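-- pv_equiv track=rewrite | github.com/AlanChan246/AI_Vibe_Coding | games/pack-chess-studio/uci-points-race/uci_points_race.py | final_sprint_tiebreak_rank
-- ===== SOURCE A (Python) =====
-- def final_sprint_tiebreak_rank(groups: list[list[str]]) -> dict[str, int]:
--     """
--     Lower rank = better. Tied riders share the same rank; next rank skips (matches place logic).
--     """
--     rank = 1
--     out: dict[str, int] = {}
--     for tied in groups:
--         if not tied:
--             continue
--         clean = [str(r).strip() for r in tied if str(r).strip()]
--         for r in clean:
--             out[r] = rank
--         rank += len(clean)
--     return out
-- ===== SOURCE B (Python) =====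
-- def final_sprint_tiebreak_rank(groups: list[list[str]]) -> dict[str, int]:
--     # Right-to-left pass: tag each cleaned group with the number of cleaned
--     # riders from that group to the end; then rank = total - suffix_count + 1.
--     rev = []
--     cnt = 0
--     for g in reversed(groups):
--         head = [s for s in (str(r).strip() for r in g) if s]
--         cnt += len(head)
--         rev.append((head, cnt))
--     total = cnt
--     out: dict[str, int] = {}
--     for head, c in reversed(rev):
--         for r in head:
--             out[r] = total - c + 1
--     return out
-- ===== Notes on version B (the rewrite author's own statement) =====
-- stated objective: alternative
-- what changed: A's single left-to-right loop with a running rank counter is replaced by a reversed traversal that tags each cleaned group with its suffix rider count, followed by a second pass deriving each rank by subtraction from the total (rank = total - suffix_count + 1).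
import Mathlib
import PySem

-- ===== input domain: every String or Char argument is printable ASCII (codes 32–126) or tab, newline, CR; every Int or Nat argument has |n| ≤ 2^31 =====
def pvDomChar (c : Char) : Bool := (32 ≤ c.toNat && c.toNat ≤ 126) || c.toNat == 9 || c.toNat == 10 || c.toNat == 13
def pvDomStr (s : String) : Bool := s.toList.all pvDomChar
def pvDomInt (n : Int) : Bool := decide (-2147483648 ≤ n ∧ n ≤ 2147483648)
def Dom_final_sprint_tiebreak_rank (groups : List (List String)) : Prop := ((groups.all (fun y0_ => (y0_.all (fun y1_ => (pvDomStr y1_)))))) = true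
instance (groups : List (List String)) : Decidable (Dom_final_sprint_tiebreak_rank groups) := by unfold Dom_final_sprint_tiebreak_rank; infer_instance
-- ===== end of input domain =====

-- B replaces A's left-to-right loop with a running rank by a right-to-left recursion
-- that tags each rider with the cleaned suffix count and derives ranks by subtraction
-- from the total; same cost, alternative structure. Return-value equivalence only
-- (A builds a fresh dict, no argument mutation).

-- ===== PORT A =====
-- A's single pass: state = (rank, out); empty groups skipped; clean = strip + drop empties.
def pvStepA (st : Int × PySem.Dict String Int) (tied : List String) : Int × PySem.Dict String Int :=
  if tied = [] then st
  else
    let clean := (tied.filter (fun r => PySem.Str.strip r ≠ "")).map PySem.Str.strip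
    let out := clean.foldl (fun d r => d.insert r st.1) st.2
    (st.1 + (clean.length : Int), out)

def final_sprint_tiebreak_rank (groups : List (List String)) : List (String × Int) :=
  (groups.foldl pvStepA (1, PySem.Dict.empty)).2.items

-- ===== PORT B =====
-- clean = strip each, keep nonempty (B's generator comprehension, same order)
def pvClean (g : List String) : List String :=
  (g.map PySem.Str.strip).filter (fun s => s ≠ "")

-- first loop: over reversed(groups), accumulating (rev, cnt)
def pvRevStep (st : List (List String × Int) × Int) (g : List String) :
    List (List String × Int) × Int :=
  let head := pvClean g
  let cnt := st.2 + (head.length : Int)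
  (st.1 ++ [(head, cnt)], cnt)

-- second loop: over reversed(rev), inserting rank total - c + 1 for each rider
def final_sprint_tiebreak_rank_alt (groups : List (List String)) : List (String × Int) :=
  let res := groups.reverse.foldl pvRevStep ([], 0)
  let total := res.2
  (res.1.reverse.foldl
      (fun d (p : List String × Int) =>
        p.1.foldl (fun d r => d.insert r (total - p.2 + 1)) d)
      PySem.Dict.empty).items

-- ===== PRECONDITION & SPEC =====
def Spec_final_sprint_tiebreak_rank (groups : List (List String)) (out : List (String × Int)) : Prop := out = final_sprint_tiebreak_rank_alt groups
instance (groups : List (List String)) (out : List (String × Int)) : Decidable (Spec_final_sprint_tiebreak_rank groups out) := by unfold Spec_final_sprint_tiebreak_rank; infer_instance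

-- ===== CLAIM (what is proved, stated in full; the proofs are below) =====
def Claim_equal_final_sprint_tiebreak_rank : Prop := ∀ (groups : List (List String)), Dom_final_sprint_tiebreak_rank groups → Spec_final_sprint_tiebreak_rank groups (final_sprint_tiebreak_rank groups)

-- ===== LEMMAS AND PROOFS =====

-- proof helper: forward recursion computing each group's suffix count above base c
def pvTagC : List (List String) → Int → List (List String × Int) × Int
  | [], c => ([], c)
  | g :: gs, c =>
    let t := pvTagC gs c
    let cnt := ((pvClean g).length : Int) + t.2
    ((pvClean g, cnt) :: t.1, cnt)

-- A's clean comprehension equals B's map-then-filter clean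
theorem pvClean_eq (g : List String) :
    (g.filter (fun r => PySem.Str.strip r ≠ "")).map PySem.Str.strip = pvClean g := by
  unfold pvClean
  rw [List.filter_map]
  rfl

-- A's step, rephrased through pvClean (the empty-group skip is absorbed: pvClean [] = [])
theorem pvStepA_eq (st : Int × PySem.Dict String Int) (tied : List String) :
    pvStepA st tied
      = (st.1 + ((pvClean tied).length : Int),
         (pvClean tied).foldl (fun d r => d.insert r st.1) st.2) := by
  by_cases h : tied = []
  · subst h; simp [pvStepA, pvClean]
  · simp only [pvStepA, if_neg h, pvClean_eq]

-- B's reversed first loop computes pvTagC backwards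
theorem pvRev_fold (groups : List (List String)) (acc : List (List String × Int)) (c : Int) :
    groups.reverse.foldl pvRevStep (acc, c)
      = (acc ++ (pvTagC groups c).1.reverse, (pvTagC groups c).2) := by
  induction groups generalizing acc c with
  | nil => simp [pvTagC]
  | cons g gs ih =>
    simp only [List.reverse_cons, List.foldl_append, ih, List.foldl_cons, List.foldl_nil,
      pvTagC, pvRevStep, List.reverse_cons, List.append_assoc]
    have h : (pvTagC gs c).2 + ((pvClean g).length : Int)
        = ((pvClean g).length : Int) + (pvTagC gs c).2 := by ring
    rw [h]

-- main invariant: A's fold from (r, d) equals the grouped fold over pvTagC,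
-- with the rank of a group tagged cnt being r + topCount - cnt
theorem pv_main (groups : List (List String)) (c r : Int) (d : PySem.Dict String Int) :
    (groups.foldl pvStepA (r, d)).2
      = (pvTagC groups c).1.foldl
          (fun d (p : List String × Int) =>
            p.1.foldl (fun d s => d.insert s (r + (pvTagC groups c).2 - p.2)) d) d := by
  induction groups generalizing r d with
  | nil => rfl
  | cons g gs ih =>
    simp only [List.foldl_cons, pvStepA_eq, pvTagC]
    rw [ih (r := r + ((pvClean g).length : Int))]
    have h1 : (fun (d : PySem.Dict String Int) s =>
          d.insert s (r + (((pvClean g).length : Int) + (pvTagC gs c).2)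
            - (((pvClean g).length : Int) + (pvTagC gs c).2)))
        = (fun d s => d.insert s r) := by
      funext d s; ring_nf
    have h2 : (fun (d : PySem.Dict String Int) (p : List String × Int) =>
          p.1.foldl (fun d s =>
            d.insert s (r + (((pvClean g).length : Int) + (pvTagC gs c).2) - p.2)) d)
        = (fun d p => p.1.foldl (fun d s =>
            d.insert s (r + ((pvClean g).length : Int) + (pvTagC gs c).2 - p.2)) d) := by
      funext d p; ring_nf
    rw [h1, h2]

theorem final_sprint_tiebreak_rank_spec : Claim_equal_final_sprint_tiebreak_rank := by
  intro groups _
  unfold Spec_final_sprint_tiebreak_rank final_sprint_tiebreak_rank final_sprint_tiebreak_rank_alt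
  rw [pvRev_fold]
  simp only [List.nil_append, List.reverse_reverse]
  rw [pv_main groups 0 1 PySem.Dict.empty]
  have : (fun (d : PySem.Dict String Int) (p : List String × Int) =>
        p.1.foldl (fun d r => d.insert r ((pvTagC groups 0).2 - p.2 + 1)) d)
      = (fun d p => p.1.foldl (fun d s => d.insert s (1 + (pvTagC groups 0).2 - p.2)) d) := by
    funext d p; ring_nf
  rw [this]
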